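-- pv_equiv track=rewrite | github.com/syamilhaziq/rayyai-capstone | rayyai-backend/routers/utils.py | map_account_type
-- ===== SOURCE A (Python) =====
-- def map_account_type(extracted_type: str) -> tuple[str, str]:
--     """
--     Maps extracted account type from AI to standard enum type + subtype.
--
--     Args:
--         extracted_type: Account type string extracted from statement (e.g., "Maybank Savings Account-i")
--
--     Returns:
--         Tuple of (standard_type, subtype)
--         - standard_type: One of the AccountTypeEnum values
--         - subtype: Specific variant or the original extracted_type
--
--     Examples:
--         "Maybank Savings Account-i" → ("savings", "Islamic Savings Account")
--         "CIMB Visa Platinum" → ("credit", "Platinum Credit Card")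
--         "Touch n Go eWallet" → ("ewallet", "Touch n Go eWallet")
--     """
--     if not extracted_type:
--         return ("savings", None)
--
--     extracted_lower = extracted_type.lower()
--
--     # Savings account variants
--     if any(keyword in extracted_lower for keyword in ['savings', 'simpanan', 'tabungan', 'saving']):
--         if any(keyword in extracted_lower for keyword in ['islamic', '-i ', 'shariah', 'syariah']):
--             return ('savings', 'Islamic Savings Account')
--         elif any(keyword in extracted_lower for keyword in ['junior', 'kid', 'child']):
--             return ('savings', 'Junior Savings Account')
--         elif any(keyword in extracted_lower for keyword in ['premier', 'premium', 'privilege']):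
--             return ('savings', 'Premier Savings Account')
--         else:
--             return ('savings', extracted_type)
--
--     # Current/Checking account variants
--     elif any(keyword in extracted_lower for keyword in ['current', 'checking', 'semasa', 'chequing']):
--         if any(keyword in extracted_lower for keyword in ['islamic', '-i ', 'shariah', 'syariah']):
--             return ('current', 'Islamic Current Account')
--         else:
--             return ('current', extracted_type)
--
--     # Credit card variants
--     elif any(keyword in extracted_lower for keyword in ['credit card', 'visa', 'mastercard', 'amex', 'american express', 'credit-card']):
--         # Extract card tier if present
--         if 'world elite' in extracted_lower:
--             return ('credit', 'World Elite Credit Card')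
--         elif 'signature' in extracted_lower:
--             return ('credit', 'Signature Credit Card')
--         elif 'platinum' in extracted_lower:
--             return ('credit', 'Platinum Credit Card')
--         elif 'gold' in extracted_lower:
--             return ('credit', 'Gold Credit Card')
--         elif 'classic' in extracted_lower:
--             return ('credit', 'Classic Credit Card')
--         else:
--             return ('credit', extracted_type)
--
--     # E-wallet variants
--     elif any(keyword in extracted_lower for keyword in ['touch n go', 'tng', 'grabpay', 'grab pay', 'boost', 'shopeepay', 'shopee pay', 'ewallet', 'e-wallet', 'wallet', 'mayabank', 'gcash']):
--         return ('ewallet', extracted_type)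
--
--     # Investment accounts
--     elif any(keyword in extracted_lower for keyword in ['investment', 'brokerage', 'trading', 'asb', 'asn', 'unit trust', 'amanah saham', 'mutual fund']):
--         return ('investment', extracted_type)
--
--     # Cash
--     elif any(keyword in extracted_lower for keyword in ['cash', 'tunai', 'physical cash']):
--         return ('cash', 'Cash')
--
--     # Default to savings if unclear (most common account type)
--     else:
--         return ('savings', extracted_type)
-- ===== SOURCE B (Python) =====
-- # Scoring/argmin rewrite: every keyword carries a numeric priority; the result is the
-- # minimum priority over ALL matching keywords (no short-circuit cascade), then a table lookup.
-- # Correct because A's first-match cascade equals the argmin when priorities follow A's order.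
--
-- _CATS = ['savings', 'current', 'credit', 'ewallet', 'investment', 'cash']
--
-- _KW_RANKS = [
--     ('savings', 0), ('simpanan', 0), ('tabungan', 0), ('saving', 0),
--     ('current', 1), ('checking', 1), ('semasa', 1), ('chequing', 1),
--     ('credit card', 2), ('visa', 2), ('mastercard', 2), ('amex', 2),
--     ('american express', 2), ('credit-card', 2),
--     ('touch n go', 3), ('tng', 3), ('grabpay', 3), ('grab pay', 3), ('boost', 3),
--     ('shopeepay', 3), ('shopee pay', 3), ('ewallet', 3), ('e-wallet', 3),
--     ('wallet', 3), ('mayabank', 3), ('gcash', 3),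
--     ('investment', 4), ('brokerage', 4), ('trading', 4), ('asb', 4), ('asn', 4),
--     ('unit trust', 4), ('amanah saham', 4), ('mutual fund', 4),
--     ('cash', 5), ('tunai', 5), ('physical cash', 5),
-- ]
--
-- _SUB_RANKS = {
--     'savings': [('islamic', 0), ('-i ', 0), ('shariah', 0), ('syariah', 0),
--                 ('junior', 1), ('kid', 1), ('child', 1),
--                 ('premier', 2), ('premium', 2), ('privilege', 2)],
--     'current': [('islamic', 0), ('-i ', 0), ('shariah', 0), ('syariah', 0)],
--     'credit':  [('world elite', 0), ('signature', 1), ('platinum', 2),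
--                 ('gold', 3), ('classic', 4)],
-- }
--
-- _SUB_LABELS = {
--     'savings': ['Islamic Savings Account', 'Junior Savings Account', 'Premier Savings Account'],
--     'current': ['Islamic Current Account'],
--     'credit':  ['World Elite Credit Card', 'Signature Credit Card', 'Platinum Credit Card',
--                 'Gold Credit Card', 'Classic Credit Card'],
-- }
--
-- _DEFAULT_SUB = {'cash': 'Cash'}
--
--
-- def map_account_type(extracted_type: str) -> tuple[str, str]:
--     if not extracted_type:
--         return ('savings', None)
--     low = extracted_type.lower()
--     rank = min((r for kw, r in _KW_RANKS if kw in low), default=len(_CATS))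
--     if rank == len(_CATS):
--         return ('savings', extracted_type)
--     cat = _CATS[rank]
--     labels = _SUB_LABELS.get(cat, [])
--     srank = min((r for kw, r in _SUB_RANKS.get(cat, []) if kw in low), default=len(labels))
--     if srank < len(labels):
--         return (cat, labels[srank])
--     return (cat, _DEFAULT_SUB.get(cat, extracted_type))
-- ===== Notes on version B (the rewrite author's own statement) =====
-- stated objective: alternative
-- what changed: Replaced the first-match if/elif keyword cascade with a flat keyword-to-priority scoring pass: compute the minimum priority over ALL matching keywords (no short-circuit), then map the winning rank to category/subtype via lookup tables.
import Mathlib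
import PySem

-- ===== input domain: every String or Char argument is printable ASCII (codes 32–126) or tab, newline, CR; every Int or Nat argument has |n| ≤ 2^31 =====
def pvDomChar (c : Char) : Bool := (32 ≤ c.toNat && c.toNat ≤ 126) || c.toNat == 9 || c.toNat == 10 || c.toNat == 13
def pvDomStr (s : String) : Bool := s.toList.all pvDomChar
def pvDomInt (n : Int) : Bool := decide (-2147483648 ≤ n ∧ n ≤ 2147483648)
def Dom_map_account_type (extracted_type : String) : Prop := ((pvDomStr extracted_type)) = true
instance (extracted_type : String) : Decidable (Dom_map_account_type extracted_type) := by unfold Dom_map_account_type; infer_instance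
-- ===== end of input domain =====

-- B replaces A's first-match if/elif cascade by a flat keyword→priority scoring pass
-- (minimum rank over ALL matching keywords) followed by table lookups (objective: alternative).

-- ===== PORT A =====
-- Literal transliteration of A: nested if/elif chains, each test is any(keyword in lower for keyword in [...]).
def map_account_type (extracted_type : String) : String × Option String :=
  if extracted_type = "" then ("savings", none)
  else
    let extracted_lower := PySem.Str.lower extracted_type
    if ["savings", "simpanan", "tabungan", "saving"].any (fun kw => PySem.Str.isIn kw extracted_lower) then
      if ["islamic", "-i ", "shariah", "syariah"].any (fun kw => PySem.Str.isIn kw extracted_lower) then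
        ("savings", some "Islamic Savings Account")
      else if ["junior", "kid", "child"].any (fun kw => PySem.Str.isIn kw extracted_lower) then
        ("savings", some "Junior Savings Account")
      else if ["premier", "premium", "privilege"].any (fun kw => PySem.Str.isIn kw extracted_lower) then
        ("savings", some "Premier Savings Account")
      else
        ("savings", some extracted_type)
    else if ["current", "checking", "semasa", "chequing"].any (fun kw => PySem.Str.isIn kw extracted_lower) then
      if ["islamic", "-i ", "shariah", "syariah"].any (fun kw => PySem.Str.isIn kw extracted_lower) then
        ("current", some "Islamic Current Account")
      else
        ("current", some extracted_type)
    else if ["credit card", "visa", "mastercard", "amex", "american express", "credit-card"].any (fun kw => PySem.Str.isIn kw extracted_lower) then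
      if PySem.Str.isIn "world elite" extracted_lower then
        ("credit", some "World Elite Credit Card")
      else if PySem.Str.isIn "signature" extracted_lower then
        ("credit", some "Signature Credit Card")
      else if PySem.Str.isIn "platinum" extracted_lower then
        ("credit", some "Platinum Credit Card")
      else if PySem.Str.isIn "gold" extracted_lower then
        ("credit", some "Gold Credit Card")
      else if PySem.Str.isIn "classic" extracted_lower then
        ("credit", some "Classic Credit Card")
      else
        ("credit", some extracted_type)
    else if ["touch n go", "tng", "grabpay", "grab pay", "boost", "shopeepay", "shopee pay", "ewallet", "e-wallet", "wallet", "mayabank", "gcash"].any (fun kw => PySem.Str.isIn kw extracted_lower) then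
      ("ewallet", some extracted_type)
    else if ["investment", "brokerage", "trading", "asb", "asn", "unit trust", "amanah saham", "mutual fund"].any (fun kw => PySem.Str.isIn kw extracted_lower) then
      ("investment", some extracted_type)
    else if ["cash", "tunai", "physical cash"].any (fun kw => PySem.Str.isIn kw extracted_lower) then
      ("cash", some "Cash")
    else
      ("savings", some extracted_type)

-- ===== PORT B =====
-- the flat (keyword, priority) table of Source B
def pvKwRanks : List (String × Nat) :=
  [("savings", 0), ("simpanan", 0), ("tabungan", 0), ("saving", 0),
   ("current", 1), ("checking", 1), ("semasa", 1), ("chequing", 1),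
   ("credit card", 2), ("visa", 2), ("mastercard", 2), ("amex", 2),
   ("american express", 2), ("credit-card", 2),
   ("touch n go", 3), ("tng", 3), ("grabpay", 3), ("grab pay", 3), ("boost", 3),
   ("shopeepay", 3), ("shopee pay", 3), ("ewallet", 3), ("e-wallet", 3),
   ("wallet", 3), ("mayabank", 3), ("gcash", 3),
   ("investment", 4), ("brokerage", 4), ("trading", 4), ("asb", 4), ("asn", 4),
   ("unit trust", 4), ("amanah saham", 4), ("mutual fund", 4),
   ("cash", 5), ("tunai", 5), ("physical cash", 5)]

def pvCats : List String := ["savings", "current", "credit", "ewallet", "investment", "cash"]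

def pvSubRanks : PySem.Dict String (List (String × Nat)) := PySem.Dict.mk
  [("savings", [("islamic", 0), ("-i ", 0), ("shariah", 0), ("syariah", 0),
                ("junior", 1), ("kid", 1), ("child", 1),
                ("premier", 2), ("premium", 2), ("privilege", 2)]),
   ("current", [("islamic", 0), ("-i ", 0), ("shariah", 0), ("syariah", 0)]),
   ("credit",  [("world elite", 0), ("signature", 1), ("platinum", 2),
                ("gold", 3), ("classic", 4)])]

def pvSubLabels : PySem.Dict String (List String) := PySem.Dict.mk
  [("savings", ["Islamic Savings Account", "Junior Savings Account", "Premier Savings Account"]),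
   ("current", ["Islamic Current Account"]),
   ("credit",  ["World Elite Credit Card", "Signature Credit Card", "Platinum Credit Card",
                "Gold Credit Card", "Classic Credit Card"])]

def pvDefaultSub : PySem.Dict String String := PySem.Dict.mk [("cash", "Cash")]

-- running minimum (port of min(...) over a generator: none = generator empty so far)
def pvUpd (a : Option Nat) (r : Nat) : Option Nat :=
  some (match a with | none => r | some m => min m r)

-- min((r for kw, r in tbl if kw in low), default=d)
def pvMinRank (low : String) (tbl : List (String × Nat)) (d : Nat) : Nat :=
  (tbl.foldl (fun a p => if PySem.Str.isIn p.1 low then pvUpd a p.2 else a) none).getD d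

def map_account_type_alt (extracted_type : String) : String × Option String :=
  if extracted_type = "" then ("savings", none)
  else
    let low := PySem.Str.lower extracted_type
    let rank := pvMinRank low pvKwRanks 6
    if rank = 6 then ("savings", some extracted_type)
    else
      let cat := pvCats.getD rank ""
      let labels := pvSubLabels.getD cat []
      let srank := pvMinRank low (pvSubRanks.getD cat []) labels.length
      if srank < labels.length then (cat, some (labels.getD srank ""))
      else (cat, some (pvDefaultSub.getD cat extracted_type))

-- ===== PRECONDITION & SPEC =====
def Spec_map_account_type (extracted_type : String) (out : String × Option String) : Prop := out = map_account_type_alt extracted_type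
instance (extracted_type : String) (out : String × Option String) : Decidable (Spec_map_account_type extracted_type out) := by unfold Spec_map_account_type; infer_instance

-- ===== CLAIM =====
def Claim_equal_map_account_type : Prop := ∀ (extracted_type : String), Dom_map_account_type extracted_type → Spec_map_account_type extracted_type (map_account_type extracted_type)

-- ===== LEMMAS AND PROOFS =====

lemma pvUpd_idem (a : Option Nat) (r : Nat) : pvUpd (pvUpd a r) r = pvUpd a r := by
  cases a <;> simp [pvUpd, min_self]

-- the fold over one priority group (all keywords with the same rank r) is a single conditional update
lemma pvFoldGroup (low : String) (r : Nat) (kws : List String) (a : Option Nat) :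
    (kws.map (fun k => (k, r))).foldl
        (fun a p => if PySem.Str.isIn p.1 low then pvUpd a p.2 else a) a
      = if kws.any (fun kw => PySem.Str.isIn kw low) then pvUpd a r else a := by
  induction kws generalizing a with
  | nil => simp
  | cons k ks ih =>
    simp only [List.map_cons, List.foldl_cons, List.any_cons]
    by_cases h : PySem.Str.isIn k low
    · rw [if_pos h, ih]
      by_cases hks : (ks.any fun kw => PySem.Str.isIn kw low) = true <;>
        simp_all [pvUpd_idem]
    · rw [if_neg h, ih]
      simp only [Bool.not_eq_true] at h
      simp_all

lemma pvKwRanks_eq :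
    pvKwRanks =
      (["savings", "simpanan", "tabungan", "saving"].map (fun k => (k, 0)))
      ++ (["current", "checking", "semasa", "chequing"].map (fun k => (k, 1)))
      ++ (["credit card", "visa", "mastercard", "amex", "american express", "credit-card"].map (fun k => (k, 2)))
      ++ (["touch n go", "tng", "grabpay", "grab pay", "boost", "shopeepay", "shopee pay", "ewallet", "e-wallet", "wallet", "mayabank", "gcash"].map (fun k => (k, 3)))
      ++ (["investment", "brokerage", "trading", "asb", "asn", "unit trust", "amanah saham", "mutual fund"].map (fun k => (k, 4)))
      ++ (["cash", "tunai", "physical cash"].map (fun k => (k, 5))) := by rfl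

-- category rank = first matching group (the argmin over ranks 0..5)
lemma pvRankChar (low : String) :
    pvMinRank low pvKwRanks 6 =
      if ["savings", "simpanan", "tabungan", "saving"].any (fun kw => PySem.Str.isIn kw low) then 0
      else if ["current", "checking", "semasa", "chequing"].any (fun kw => PySem.Str.isIn kw low) then 1
      else if ["credit card", "visa", "mastercard", "amex", "american express", "credit-card"].any (fun kw => PySem.Str.isIn kw low) then 2
      else if ["touch n go", "tng", "grabpay", "grab pay", "boost", "shopeepay", "shopee pay", "ewallet", "e-wallet", "wallet", "mayabank", "gcash"].any (fun kw => PySem.Str.isIn kw low) then 3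
      else if ["investment", "brokerage", "trading", "asb", "asn", "unit trust", "amanah saham", "mutual fund"].any (fun kw => PySem.Str.isIn kw low) then 4
      else if ["cash", "tunai", "physical cash"].any (fun kw => PySem.Str.isIn kw low) then 5
      else 6 := by
  unfold pvMinRank
  rw [pvKwRanks_eq]
  simp only [List.foldl_append, pvFoldGroup]
  split_ifs <;> simp_all [pvUpd]

lemma pvSubSavingsChar (low : String) :
    pvMinRank low [("islamic", 0), ("-i ", 0), ("shariah", 0), ("syariah", 0),
                   ("junior", 1), ("kid", 1), ("child", 1),
                   ("premier", 2), ("premium", 2), ("privilege", 2)] 3 =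
      if ["islamic", "-i ", "shariah", "syariah"].any (fun kw => PySem.Str.isIn kw low) then 0
      else if ["junior", "kid", "child"].any (fun kw => PySem.Str.isIn kw low) then 1
      else if ["premier", "premium", "privilege"].any (fun kw => PySem.Str.isIn kw low) then 2
      else 3 := by
  unfold pvMinRank
  rw [show ([("islamic", 0), ("-i ", 0), ("shariah", 0), ("syariah", 0),
             ("junior", 1), ("kid", 1), ("child", 1),
             ("premier", 2), ("premium", 2), ("privilege", 2)] : List (String × Nat)) =
      (["islamic", "-i ", "shariah", "syariah"].map (fun k => (k, 0)))
      ++ (["junior", "kid", "child"].map (fun k => (k, 1)))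
      ++ (["premier", "premium", "privilege"].map (fun k => (k, 2))) from rfl]
  simp only [List.foldl_append, pvFoldGroup]
  split_ifs <;> simp_all [pvUpd]

lemma pvSubCurrentChar (low : String) :
    pvMinRank low [("islamic", 0), ("-i ", 0), ("shariah", 0), ("syariah", 0)] 1 =
      if ["islamic", "-i ", "shariah", "syariah"].any (fun kw => PySem.Str.isIn kw low) then 0
      else 1 := by
  unfold pvMinRank
  rw [show ([("islamic", 0), ("-i ", 0), ("shariah", 0), ("syariah", 0)] : List (String × Nat)) =
      ["islamic", "-i ", "shariah", "syariah"].map (fun k => (k, 0)) from rfl]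
  simp only [pvFoldGroup]
  split_ifs <;> simp_all [pvUpd]

lemma pvSubCreditChar (low : String) :
    pvMinRank low [("world elite", 0), ("signature", 1), ("platinum", 2),
                   ("gold", 3), ("classic", 4)] 5 =
      if PySem.Str.isIn "world elite" low then 0
      else if PySem.Str.isIn "signature" low then 1
      else if PySem.Str.isIn "platinum" low then 2
      else if PySem.Str.isIn "gold" low then 3
      else if PySem.Str.isIn "classic" low then 4
      else 5 := by
  unfold pvMinRank
  rw [show ([("world elite", 0), ("signature", 1), ("platinum", 2),
             ("gold", 3), ("classic", 4)] : List (String × Nat)) =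
      (["world elite"].map (fun k => (k, 0))) ++ (["signature"].map (fun k => (k, 1)))
      ++ (["platinum"].map (fun k => (k, 2))) ++ (["gold"].map (fun k => (k, 3)))
      ++ (["classic"].map (fun k => (k, 4))) from rfl]
  simp only [List.foldl_append, pvFoldGroup, List.any_cons, List.any_nil, Bool.or_false]
  split_ifs <;> simp_all [pvUpd]

-- ===== VERDICT =====
theorem map_account_type_spec : Claim_equal_map_account_type := by
  intro s _
  unfold Spec_map_account_type map_account_type map_account_type_alt
  by_cases hs : s = ""
  · simp [hs]
  · simp only [hs, if_false]
    rw [pvRankChar]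
    set low := PySem.Str.lower s with hlow
    by_cases h0 : ["savings", "simpanan", "tabungan", "saving"].any (fun kw => PySem.Str.isIn kw low)
    · simp only [h0, if_true, show (0 : Nat) ≠ 6 by decide, if_false,
        pvCats, pvSubLabels, pvSubRanks, pvDefaultSub]
      simp [PySem.Dict.getD, PySem.Dict.get?, -PySem.Str.isIn_eq]
      rw [pvSubSavingsChar]
      split_ifs <;> simp_all
    · by_cases h1 : ["current", "checking", "semasa", "chequing"].any (fun kw => PySem.Str.isIn kw low)
      · simp only [h0, h1, Bool.false_eq_true, if_false, if_true,
          pvCats, pvSubLabels, pvSubRanks, pvDefaultSub]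
        simp [PySem.Dict.getD, PySem.Dict.get?, -PySem.Str.isIn_eq]
        rw [pvSubCurrentChar]
        split_ifs <;> simp_all
      · by_cases h2 : ["credit card", "visa", "mastercard", "amex", "american express", "credit-card"].any (fun kw => PySem.Str.isIn kw low)
        · simp only [h0, h1, h2, Bool.false_eq_true, if_false, if_true,
            pvCats, pvSubLabels, pvSubRanks, pvDefaultSub]
          simp [PySem.Dict.getD, PySem.Dict.get?, -PySem.Str.isIn_eq]
          rw [pvSubCreditChar]
          split_ifs <;> simp_all
        · by_cases h3 : ["touch n go", "tng", "grabpay", "grab pay", "boost", "shopeepay", "shopee pay", "ewallet", "e-wallet", "wallet", "mayabank", "gcash"].any (fun kw => PySem.Str.isIn kw low)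
          · simp_all [pvCats, pvSubLabels, pvSubRanks, pvDefaultSub,
              PySem.Dict.getD, PySem.Dict.get?, pvMinRank, pvUpd]
          · by_cases h4 : ["investment", "brokerage", "trading", "asb", "asn", "unit trust", "amanah saham", "mutual fund"].any (fun kw => PySem.Str.isIn kw low)
            · simp_all [pvCats, pvSubLabels, pvSubRanks, pvDefaultSub,
                PySem.Dict.getD, PySem.Dict.get?, pvMinRank, pvUpd]
            · by_cases h5 : ["cash", "tunai", "physical cash"].any (fun kw => PySem.Str.isIn kw low)
              · simp_all [pvCats, pvSubLabels, pvSubRanks, pvDefaultSub,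
                  PySem.Dict.getD, PySem.Dict.get?, pvMinRank, pvUpd]
              · simp_all
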